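-- pv_equiv track=rewrite | github.com/jsw7524/Leetcode | 6194. Minimize XOR/6194. Minimize XOR.py | OnesToZeros
-- ===== SOURCE A (Python) =====
-- def OnesToZeros(binstr, n):
--     tmp=list()
--     for c in binstr:
--         if c == "1":
--             if n>0:
--                 tmp.append("1")
--                 n-=1
--             else:
--                 tmp.append("0")
--         else:
--             tmp.append("0")
--     return  ''.join(tmp)
-- ===== SOURCE B (Python) =====
-- def OnesToZeros(binstr, n):
--     keep = set()
--     count = 0
--     for i, c in enumerate(binstr):
--         if c == "1" and count < n:
--             keep.add(i)
--             count += 1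
--     return ''.join('1' if i in keep else '0' for i in range(len(binstr)))
-- ===== Notes on version B (the rewrite author's own statement) =====
-- stated objective: alternative
-- what changed: Instead of one loop with an inline countdown that emits characters as it goes, B first selects the index set of the first n ones in one pass, then renders the output in a second pass over all positions by set membership.
import Mathlib
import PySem

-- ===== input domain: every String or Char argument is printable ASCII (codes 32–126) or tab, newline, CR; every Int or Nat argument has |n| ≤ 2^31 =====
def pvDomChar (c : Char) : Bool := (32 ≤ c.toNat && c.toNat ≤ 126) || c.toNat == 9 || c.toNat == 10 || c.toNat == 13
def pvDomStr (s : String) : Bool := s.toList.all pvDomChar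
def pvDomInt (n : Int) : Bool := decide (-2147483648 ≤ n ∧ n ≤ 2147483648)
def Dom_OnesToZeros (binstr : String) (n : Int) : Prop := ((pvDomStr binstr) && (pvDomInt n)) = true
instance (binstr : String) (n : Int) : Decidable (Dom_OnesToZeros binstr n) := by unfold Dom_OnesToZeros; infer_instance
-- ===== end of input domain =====

-- B selects the surviving indices in one pass into a set, then renders by membership in a second pass (alternative decomposition, same cost).


-- ===== PORT A =====
def OnesToZeros (binstr : String) (n : Int) : String :=
  String.mk (binstr.toList.foldl
    (fun (st : List Char × Int) c =>
      if c = '1' then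
        if st.2 > 0 then (st.1 ++ ['1'], st.2 - 1) else (st.1 ++ ['0'], st.2)
      else (st.1 ++ ['0'], st.2))
    ([], n)).1

-- ===== PORT B =====
def OnesToZeros_alt (binstr : String) (n : Int) : String :=
  String.mk ((PySem.List.pyRange 0 (binstr.toList.length : Int) 1).map
    (fun i => if ((PySem.List.enumerate binstr.toList 0).foldl
        (fun (st : PySem.Set Int × Int) p =>
          if p.2 = '1' ∧ st.2 < n then (PySem.Set.add st.1 p.1, st.2 + 1) else st)
        (PySem.Set.empty, 0)).1.contains i then '1' else '0'))

-- ===== PRECONDITION & SPEC =====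
def Spec_OnesToZeros (binstr : String) (n : Int) (out : String) : Prop := out = OnesToZeros_alt binstr n
instance (binstr : String) (n : Int) (out : String) : Decidable (Spec_OnesToZeros binstr n out) := by unfold Spec_OnesToZeros; infer_instance

-- ===== CLAIM (what is proved, stated in full; the proofs are below) =====
def Claim_equal_OnesToZeros : Prop := ∀ (binstr : String) (n : Int), Dom_OnesToZeros binstr n → Spec_OnesToZeros binstr n (OnesToZeros binstr n)

-- ===== LEMMAS AND PROOFS =====

-- common form: the output characters, consuming budget m
def pvGo (m : Int) : List Char → List Char
  | [] => []
  | c :: cs => if c = '1' ∧ 0 < m then '1' :: pvGo (m - 1) cs else '0' :: pvGo m cs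

-- the indices B keeps, scanning cs at start index i0 with counter cnt against bound nn
def pvSel (nn : Int) : Int → Int → List Char → List Int
  | i0, cnt, [] => []
  | i0, cnt, c :: cs =>
      if c = '1' ∧ cnt < nn then i0 :: pvSel nn (i0+1) (cnt+1) cs else pvSel nn (i0+1) cnt cs

theorem pvSel_ge (nn : Int) (cs : List Char) : ∀ (i0 cnt : Int), ∀ x ∈ pvSel nn i0 cnt cs, i0 ≤ x := by
  induction cs with
  | nil => intro i0 cnt x hx; simp [pvSel] at hx
  | cons c cs ih =>
    intro i0 cnt x hx
    simp only [pvSel] at hx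
    split at hx
    · rcases List.mem_cons.mp hx with h | h
      · omega
      · have := ih (i0+1) (cnt+1) x h; omega
    · have := ih (i0+1) cnt x hx; omega

theorem pvA_fold (n : Int) (cs : List Char) : ∀ (acc : List Char) (m : Int),
    (cs.foldl (fun (st : List Char × Int) c =>
      if c = '1' then
        if st.2 > 0 then (st.1 ++ ['1'], st.2 - 1) else (st.1 ++ ['0'], st.2)
      else (st.1 ++ ['0'], st.2)) (acc, m)).1 = acc ++ pvGo m cs := by
  induction cs with
  | nil => intro acc m; simp [pvGo]
  | cons c cs ih =>
    intro acc m
    simp only [List.foldl_cons, pvGo]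
    by_cases hc : c = '1'
    · by_cases hm : 0 < m
      · simp [hc, hm, ih]
      · simp [hc, hm, ih]
    · simp [hc, ih]

theorem pvB_fold (nn : Int) (cs : List Char) : ∀ (i0 cnt : Int) (keep0 : PySem.Set Int),
    (∀ x ∈ keep0, x < i0) →
    ((PySem.List.enumerate cs i0).foldl
      (fun (st : PySem.Set Int × Int) p =>
        if p.2 = '1' ∧ st.2 < nn then (PySem.Set.add st.1 p.1, st.2 + 1) else st)
      (keep0, cnt)).1 = keep0 ++ pvSel nn i0 cnt cs := by
  induction cs with
  | nil => intro i0 cnt keep0 _; simp [PySem.List.enumerate, pvSel]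
  | cons c cs ih =>
    intro i0 cnt keep0 hk
    rw [PySem.List.enumerate_cons]
    simp only [List.foldl_cons]
    by_cases h : c = '1' ∧ cnt < nn
    · have hni : i0 ∉ keep0 := fun hmem => by have := hk i0 hmem; omega
      have hadd : PySem.Set.add keep0 i0 = keep0 ++ [i0] := by
        simp [PySem.Set.add, PySem.Set.contains, hni]
      simp only [h, and_self, if_pos]
      rw [ih (i0+1) (cnt+1) (PySem.Set.add keep0 i0)
        (by intro x hx; rw [hadd] at hx; rcases List.mem_append.mp hx with h' | h'
            · have := hk x h'; omega
            · simp at h'; omega)]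
      rw [hadd, pvSel, if_pos (show ('1' : Char) = '1' ∧ cnt < nn from ⟨rfl, h.2⟩), List.append_assoc]
      rfl
    · rw [if_neg h]
      rw [ih (i0+1) cnt keep0 (by intro x hx; have := hk x hx; omega)]
      rw [pvSel, if_neg h]

theorem pvB_render (nn : Int) (cs : List Char) : ∀ (i0 cnt : Int) (keep0 : List Int),
    (∀ x ∈ keep0, x < i0) →
    (PySem.List.pyRange i0 (i0 + (cs.length : Int)) 1).map
      (fun i => if (keep0 ++ pvSel nn i0 cnt cs).contains i then '1' else '0')
      = pvGo (nn - cnt) cs := by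
  induction cs with
  | nil => intro i0 cnt keep0 _; simp [pvGo]
  | cons c cs ih =>
    intro i0 cnt keep0 hk
    have hlen : i0 < i0 + ((c :: cs).length : Int) := by
      simp only [List.length_cons]; push_cast; omega
    rw [PySem.List.pyRange_one_cons hlen]
    simp only [List.map_cons]
    have hrange : i0 + ((c :: cs).length : Int) = (i0 + 1) + (cs.length : Int) := by
      simp only [List.length_cons]; push_cast; omega
    by_cases h : c = '1' ∧ cnt < nn
    · have hsel : pvSel nn i0 cnt (c :: cs) = i0 :: pvSel nn (i0+1) (cnt+1) cs := by
        rw [pvSel, if_pos h]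
      have hmem : (keep0 ++ pvSel nn i0 cnt (c :: cs)).contains i0 = true := by
        rw [hsel]; simp
      have hgo : pvGo (nn - cnt) (c :: cs) = '1' :: pvGo (nn - cnt - 1) cs := by
        rw [pvGo, if_pos ⟨h.1, by omega⟩]
      rw [hmem, hgo, if_pos rfl]
      congr 1
      have hcong : ∀ i ∈ PySem.List.pyRange (i0+1) ((i0+1) + (cs.length : Int)) 1,
          (if (keep0 ++ pvSel nn i0 cnt (c :: cs)).contains i then '1' else '0')
          = (if ((keep0 ++ [i0]) ++ pvSel nn (i0+1) (cnt+1) cs).contains i then '1' else '0') := by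
        intro i hi
        rw [hsel]
        have heq : keep0 ++ i0 :: pvSel nn (i0+1) (cnt+1) cs = (keep0 ++ [i0]) ++ pvSel nn (i0+1) (cnt+1) cs := by
          simp
        rw [heq]
      rw [hrange, List.map_congr_left hcong]
      have := ih (i0+1) (cnt+1) (keep0 ++ [i0]) (by
        intro x hx; rcases List.mem_append.mp hx with h' | h'
        · have := hk x h'; omega
        · simp at h'; omega)
      rw [this]
      congr 1
      omega
    · have hsel : pvSel nn i0 cnt (c :: cs) = pvSel nn (i0+1) cnt cs := by
        rw [pvSel, if_neg h]
      have hmem : (keep0 ++ pvSel nn i0 cnt (c :: cs)).contains i0 = false := by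
        rw [hsel]
        simp only [List.contains_eq_mem, decide_eq_false_iff_not, List.mem_append]
        rintro (h' | h')
        · have := hk i0 h'; omega
        · have := pvSel_ge nn cs (i0+1) cnt i0 h'; omega
      have hgo : pvGo (nn - cnt) (c :: cs) = '0' :: pvGo (nn - cnt) cs := by
        rw [pvGo, if_neg (by rintro ⟨h1, h2⟩; exact h ⟨h1, by omega⟩)]
      rw [hmem, hgo]
      simp only [Bool.false_eq_true, if_false]
      congr 1
      rw [hrange, hsel]
      exact ih (i0+1) cnt keep0 (by intro x hx; have := hk x hx; omega)

-- ===== VERDICT (by name: the statement is the Claim_ definition above) =====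
theorem OnesToZeros_spec : Claim_equal_OnesToZeros := by
  intro binstr n _
  unfold Spec_OnesToZeros OnesToZeros OnesToZeros_alt
  rw [pvA_fold n binstr.toList [] n]
  rw [pvB_fold n binstr.toList 0 0 PySem.Set.empty (by intro x hx; simp [PySem.Set.empty] at hx)]
  have h2 := pvB_render n binstr.toList 0 0 PySem.Set.empty (by intro x hx; simp [PySem.Set.empty] at hx)
  simp only [PySem.Set.empty, zero_add, sub_zero, List.nil_append, PySem.Set.contains] at h2 ⊢
  exact (congrArg String.mk h2).symm
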